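-- pv_equiv track=rewrite | github.com/sophiecwoods/Battleships | battleships.py | are_unsunk_ships_left
-- ===== SOURCE A (Python) =====
-- def is_sunk(ship):
--     """Returns Boolean value, which is True if ship is sunk and False otherwise."""
--     # I have assigned the elements of ship to variables throughout for code readability
--     row_pos = ship[0]
--     col_pos = ship[1]
--     horizontal = ship[2]
--     ship_length = ship[3]
--     hits = ship[4]
--     # initialize number of hits to 0
--     num_of_hits = 0
--
--     # starting at top left square and incrementing row or column by 1 depending on ship orientation,
--     # checks whether each square the ship occupies is hit and adds 1 to num_of_hits if it is
--     for i in range(ship_length):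
--         if horizontal:
--             if (row_pos, col_pos + i) in hits:
--                 num_of_hits += 1
--         else:
--             if (row_pos + i, col_pos) in hits:
--                 num_of_hits += 1
--
--     # checks if all squares in ship are hit
--     if num_of_hits == ship_length:
--         return True
--     else:
--         return False
--
-- def are_unsunk_ships_left(fleet):
--     """Returns Boolean value, which is True if there are ships in the fleet that are still not sunk, and False
--      otherwise."""
--     sunk_ships = 0
--
--     # checks if number of sunk ships equals number of ships in fleet
--     for ship in fleet:
--         if is_sunk(ship):
--             sunk_ships += 1
--
--     if sunk_ships == len(fleet):
--         return False
--     else: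
--         return True
-- ===== SOURCE B (Python) =====
-- def are_unsunk_ships_left(fleet):
--     """True iff some ship in the fleet is not fully hit: instead of walking the
--     ship's squares, collect the distinct hits that land on the ship by a
--     coordinate-range test and compare their number with ship_length."""
--     def hits_on_ship(row, col, horizontal, length, hits):
--         if horizontal:
--             return {h for h in hits if h[0] == row and 0 <= h[1] - col < length}
--         return {h for h in hits if h[1] == col and 0 <= h[0] - row < length}
--
--     return any(len(hits_on_ship(*s)) != s[3] for s in fleet)
-- ===== Notes on version B (the rewrite author's own statement) =====
-- stated objective: faster
-- what changed: Instead of walking every square of every ship and counting membership in the hit list, then comparing a sunk-ship counter to len(fleet), B scans each ship's hit list once, keeps the distinct hits that fall inside the ship via a coordinate-range test, and returns any(len(hits_on_ship) != ship_length).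
import Mathlib
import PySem

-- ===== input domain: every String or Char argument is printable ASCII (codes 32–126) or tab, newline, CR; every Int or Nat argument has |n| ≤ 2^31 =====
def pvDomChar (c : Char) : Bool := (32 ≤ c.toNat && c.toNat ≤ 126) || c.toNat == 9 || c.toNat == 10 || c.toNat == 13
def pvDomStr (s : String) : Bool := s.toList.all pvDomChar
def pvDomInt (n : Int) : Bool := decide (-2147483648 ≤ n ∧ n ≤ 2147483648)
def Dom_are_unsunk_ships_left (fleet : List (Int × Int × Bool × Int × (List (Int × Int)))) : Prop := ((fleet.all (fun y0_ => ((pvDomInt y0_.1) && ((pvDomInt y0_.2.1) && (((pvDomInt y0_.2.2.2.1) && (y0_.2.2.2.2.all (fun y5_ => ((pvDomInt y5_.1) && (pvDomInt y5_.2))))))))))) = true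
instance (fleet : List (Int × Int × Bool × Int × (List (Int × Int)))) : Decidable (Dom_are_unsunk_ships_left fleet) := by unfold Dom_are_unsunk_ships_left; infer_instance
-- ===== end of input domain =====

-- B replaces A's per-cell hit counter and sunk-ship counter by a set-cardinality test
-- |occupied & hits| == ship_length inside one any(...) over the fleet (objective: alternative).

-- ===== PORT A =====
def is_sunk (ship : Int × Int × Bool × Int × (List (Int × Int))) : Bool :=
  let row_pos := ship.1
  let col_pos := ship.2.1
  let horizontal := ship.2.2.1
  let ship_length := ship.2.2.2.1
  let hits := ship.2.2.2.2
  let num_of_hits : Int :=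
    (PySem.List.pyRange 0 ship_length 1).foldl (fun n i =>
      if horizontal then
        (if (row_pos, col_pos + i) ∈ hits then n + 1 else n)
      else
        (if (row_pos + i, col_pos) ∈ hits then n + 1 else n)) 0
  if num_of_hits = ship_length then true else false

def are_unsunk_ships_left (fleet : List (Int × Int × Bool × Int × (List (Int × Int)))) : Bool :=
  let sunk_ships : Int := fleet.foldl (fun n ship => if is_sunk ship then n + 1 else n) 0
  if sunk_ships = (fleet.length : Int) then false else true

-- ===== PORT B =====
def hits_on_ship (row col : Int) (horizontal : Bool) (length : Int)
    (hits : List (Int × Int)) : PySem.Set (Int × Int) :=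
  if horizontal then
    PySem.Set.ofList (hits.filter (fun h =>
      decide (h.1 = row) && (decide (0 ≤ h.2 - col) && decide (h.2 - col < length))))
  else
    PySem.Set.ofList (hits.filter (fun h =>
      decide (h.2 = col) && (decide (0 ≤ h.1 - row) && decide (h.1 - row < length))))

def are_unsunk_ships_left_alt (fleet : List (Int × Int × Bool × Int × (List (Int × Int)))) : Bool :=
  fleet.any (fun s =>
    decide (PySem.Set.len (hits_on_ship s.1 s.2.1 s.2.2.1 s.2.2.2.1 s.2.2.2.2) ≠ s.2.2.2.1))

-- ===== PRECONDITION & SPEC =====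
def Spec_are_unsunk_ships_left (fleet : List (Int × Int × Bool × Int × (List (Int × Int)))) (out : Bool) : Prop := out = are_unsunk_ships_left_alt fleet
instance (fleet : List (Int × Int × Bool × Int × (List (Int × Int)))) (out : Bool) : Decidable (Spec_are_unsunk_ships_left fleet out) := by unfold Spec_are_unsunk_ships_left; infer_instance

-- ===== CLAIM (what is proved, stated in full; the proofs are below) =====
def Claim_equal_are_unsunk_ships_left : Prop := ∀ (fleet : List (Int × Int × Bool × Int × (List (Int × Int)))), Dom_are_unsunk_ships_left fleet → Spec_are_unsunk_ships_left fleet (are_unsunk_ships_left fleet)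

-- ===== LEMMAS AND PROOFS =====

-- A's counting fold is countP.
theorem foldl_count_int {α : Type} (p : α → Prop) [DecidablePred p] (l : List α) (n : Int) :
    l.foldl (fun n i => if p i then n + 1 else n) n
      = n + (l.countP (fun i => decide (p i)) : Int) := by
  induction l generalizing n with
  | nil => simp
  | cons x xs ih =>
    simp only [List.foldl_cons, List.countP_cons, ih]
    by_cases h : p x
    · simp [h]; omega
    · simp [h]

-- The distinct hits satisfying p (= membership in the injective cell list) are in
-- bijection with the hit cells, so the set size equals A's per-cell hit count.
theorem len_ofList_filter_eq_countP (hits : List (Int × Int)) (len : Int)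
    (f : Int → Int × Int) (hf : Function.Injective f) (p : Int × Int → Bool)
    (hp : ∀ x, p x = decide (x ∈ (PySem.List.pyRange 0 len 1).map f)) :
    ((PySem.Set.ofList (hits.filter p)).length : Int)
      = (List.countP (fun i => decide (f i ∈ hits)) (PySem.List.pyRange 0 len 1) : Int) := by
  have hcellsnd : ((PySem.List.pyRange 0 len 1).map f).Nodup :=
    (PySem.List.nodup_pyRange_one 0 len).map hf
  have h1 : (PySem.Set.ofList (hits.filter p)).Nodup := PySem.Set.nodup_ofList _
  have h2 : (((PySem.List.pyRange 0 len 1).map f).filter (fun x => decide (x ∈ hits))).Nodup :=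
    hcellsnd.filter _
  have hmem : ∀ x, x ∈ PySem.Set.ofList (hits.filter p)
      ↔ x ∈ ((PySem.List.pyRange 0 len 1).map f).filter (fun x => decide (x ∈ hits)) := by
    intro x
    rw [PySem.Set.mem_ofList, List.mem_filter, List.mem_filter, hp x]
    simp [and_comm]
  have hperm := (List.perm_ext_iff_of_nodup h1 h2).mpr hmem
  rw [hperm.length_eq, ← List.countP_eq_length_filter, List.countP_map]
  rfl

-- Per-ship agreement for one injective cell map and its coordinate test.
theorem key_lemma (row col len : Int) (horizontal : Bool) (hits : List (Int × Int))
    (f : Int → Int × Int) (hf : Function.Injective f) (p : Int × Int → Bool)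
    (hp : ∀ x, p x = decide (x ∈ (PySem.List.pyRange 0 len 1).map f))
    (hA : is_sunk (row, col, horizontal, len, hits) =
      (if ((PySem.List.pyRange 0 len 1).foldl
            (fun n i => if f i ∈ hits then n + 1 else n) (0 : Int)) = len
        then true else false)) :
    is_sunk (row, col, horizontal, len, hits) =
      !decide (PySem.Set.len (PySem.Set.ofList (hits.filter p)) ≠ len) := by
  rw [hA]
  simp only [PySem.Set.len, len_ofList_filter_eq_countP hits len f hf p hp,
    foldl_count_int (fun i => f i ∈ hits), zero_add]
  by_cases h : (List.countP (fun i => decide (f i ∈ hits)) (PySem.List.pyRange 0 len 1) : Int) = len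
    <;> simp [h]

-- Per-ship agreement: A's sunk test equals (the negation of) B's per-ship unsunk test.
theorem is_sunk_eq (s : Int × Int × Bool × Int × (List (Int × Int))) :
    is_sunk s = !decide (PySem.Set.len
      (hits_on_ship s.1 s.2.1 s.2.2.1 s.2.2.2.1 s.2.2.2.2) ≠ s.2.2.2.1) := by
  obtain ⟨row, col, horizontal, len, hits⟩ := s
  cases horizontal with
  | true =>
    have hf : Function.Injective (fun i : Int => (row, col + i)) := by
      intro a b h; simpa using h
    simp only [hits_on_ship, if_pos]
    refine key_lemma row col len true hits _ hf _ ?_ (by simp only [is_sunk, if_pos])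
    intro x
    have hmem : x ∈ ((PySem.List.pyRange 0 len 1).map (fun i : Int => (row, col + i)))
        ↔ (x.1 = row ∧ (0 ≤ x.2 - col ∧ x.2 - col < len)) := by
      obtain ⟨x1, x2⟩ := x
      simp only [List.mem_map, PySem.List.mem_pyRange_one, Prod.mk.injEq]
      constructor
      · rintro ⟨i, ⟨h0, h1⟩, rfl, rfl⟩; exact ⟨rfl, by omega, by omega⟩
      · rintro ⟨rfl, h0, h1⟩; exact ⟨x2 - col, ⟨h0, by omega⟩, rfl, by omega⟩
    simp [hmem, Bool.decide_and]
  | false =>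
    have hf : Function.Injective (fun i : Int => (row + i, col)) := by
      intro a b h; simp at h; omega
    simp only [hits_on_ship]
    refine key_lemma row col len false hits _ hf _ ?_ (by simp [is_sunk])
    intro x
    have hmem : x ∈ ((PySem.List.pyRange 0 len 1).map (fun i : Int => (row + i, col)))
        ↔ (x.2 = col ∧ (0 ≤ x.1 - row ∧ x.1 - row < len)) := by
      obtain ⟨x1, x2⟩ := x
      simp only [List.mem_map, PySem.List.mem_pyRange_one, Prod.mk.injEq]
      constructor
      · rintro ⟨i, ⟨h0, h1⟩, rfl, rfl⟩; exact ⟨rfl, by omega, by omega⟩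
      · rintro ⟨rfl, h0, h1⟩; exact ⟨x1 - row, ⟨h0, by omega⟩, by omega, rfl⟩
    simp [hmem, Bool.decide_and]

-- ===== VERDICT (by name: the statement is the Claim_ definition above) =====
theorem are_unsunk_ships_left_spec : Claim_equal_are_unsunk_ships_left := by
  intro fleet _
  show are_unsunk_ships_left fleet = are_unsunk_ships_left_alt fleet
  simp only [are_unsunk_ships_left,
    foldl_count_int (fun ship => is_sunk ship = true), zero_add]
  simp only [are_unsunk_ships_left_alt]
  have hcp : (List.countP (fun s => decide (is_sunk s = true)) fleet) = List.countP is_sunk fleet :=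
    List.countP_congr (fun s _ => by simp)
  rw [hcp]
  have hall : (List.countP is_sunk fleet : Int) = (fleet.length : Int)
      ↔ ∀ s ∈ fleet, is_sunk s := by
    rw [Int.natCast_inj, List.countP_eq_length]
  by_cases h : (List.countP is_sunk fleet : Int) = (fleet.length : Int)
  · rw [if_pos h]
    symm
    simp only [List.any_eq_false]
    intro s hs
    have := hall.mp h s hs
    rw [is_sunk_eq] at this
    simpa using this
  · rw [if_neg h]
    symm
    have hex : ∃ s ∈ fleet, is_sunk s = false := by
      by_contra hc
      push Not at hc
      exact h (hall.mpr (fun s hs => by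
        have := hc s hs
        cases hb : is_sunk s
        · exact absurd hb this
        · rfl))
    obtain ⟨s, hs, hns⟩ := hex
    rw [List.any_eq_true]
    refine ⟨s, hs, ?_⟩
    have := is_sunk_eq s
    rw [hns] at this
    simpa using this.symm
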